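-- pv_equiv track=rewrite | github.com/lizazim/TraQuLA | src/process_question.py | check_capitalisation
-- ===== SOURCE A (Python) =====
-- def check_capitalisation(word1, word2):
--   upper = False
--   for (x, y) in zip(word1, word2):
--     if x == y and x.isupper() == True:
--       upper = True
--     elif x != y:
--       return False
--     else:
--       pass
--   return upper
-- ===== SOURCE B (Python) =====
-- def check_capitalisation(word1, word2):
--     n = min(len(word1), len(word2))
--     if word1[:n] != word2[:n]:
--         return False
--     return any(c.isupper() for c in word1[:n])
-- ===== Notes on version B (the rewrite author's own statement) =====
-- stated objective: simpler
-- what changed: Replaces A's fused short-circuiting zip loop (mismatch check and uppercase flag in one pass with an accumulator) by a bulk slice equality test on the common prefix followed by a separate any-uppercase scan.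
import Mathlib
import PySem

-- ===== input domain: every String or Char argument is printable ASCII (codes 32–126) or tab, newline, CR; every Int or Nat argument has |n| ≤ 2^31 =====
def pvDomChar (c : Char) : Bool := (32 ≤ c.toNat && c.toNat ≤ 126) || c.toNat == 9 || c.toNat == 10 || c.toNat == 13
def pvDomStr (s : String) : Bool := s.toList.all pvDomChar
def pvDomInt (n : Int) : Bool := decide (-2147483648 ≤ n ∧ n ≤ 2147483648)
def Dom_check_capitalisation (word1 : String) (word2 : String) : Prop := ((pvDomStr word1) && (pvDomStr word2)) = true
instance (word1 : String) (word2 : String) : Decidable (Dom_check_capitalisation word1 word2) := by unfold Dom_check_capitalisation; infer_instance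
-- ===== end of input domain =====

-- B replaces A's fused short-circuiting loop by a bulk common-prefix equality test plus a separate uppercase scan (objective: simpler).

-- ===== PORT A =====
-- the for-loop over zip(word1, word2) with the `upper` accumulator
def pvLoopA : List (Char × Char) → Bool → Bool
  | [], upper => upper
  | (x, y) :: rest, upper =>
    if x == y && PySem.Chars.isupper x then pvLoopA rest true
    else if x ≠ y then false
    else pvLoopA rest upper

def check_capitalisation (word1 : String) (word2 : String) : Bool :=
  pvLoopA (word1.toList.zip word2.toList) false

-- ===== PORT B =====
def check_capitalisation_alt (word1 : String) (word2 : String) : Bool :=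
  let n := min word1.toList.length word2.toList.length
  if word1.toList.take n = word2.toList.take n then
    (word1.toList.take n).any PySem.Chars.isupper
  else false

-- ===== PRECONDITION & SPEC =====
def Spec_check_capitalisation (word1 : String) (word2 : String) (out : Bool) : Prop := out = check_capitalisation_alt word1 word2
instance (word1 : String) (word2 : String) (out : Bool) : Decidable (Spec_check_capitalisation word1 word2 out) := by unfold Spec_check_capitalisation; infer_instance

-- ===== CLAIM (what is proved, stated in full; the proofs are below) =====
def Claim_equal_check_capitalisation : Prop := ∀ (word1 : String) (word2 : String), Dom_check_capitalisation word1 word2 → Spec_check_capitalisation word1 word2 (check_capitalisation word1 word2)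

-- ===== LEMMAS AND PROOFS =====

theorem pvLoopA_eq (l1 : List Char) : ∀ (l2 : List Char) (u : Bool),
    pvLoopA (l1.zip l2) u =
      (if l1.take (min l1.length l2.length) = l2.take (min l1.length l2.length) then
        u || (l1.take (min l1.length l2.length)).any PySem.Chars.isupper
      else false) := by
  induction l1 with
  | nil => intro l2 u; simp [pvLoopA]
  | cons x xs ih =>
    intro l2 u
    cases l2 with
    | nil => simp [pvLoopA]
    | cons y ys =>
      have hmin : min (x :: xs).length (y :: ys).length = min xs.length ys.length + 1 := by
        simp [Nat.succ_min_succ]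
      rw [hmin]
      simp only [List.zip_cons_cons, List.take_succ_cons, pvLoopA]
      by_cases hxy : x = y
      · subst hxy
        by_cases hu : PySem.Chars.isupper x = true
        · simp only [hu, beq_self_eq_true, Bool.and_self, if_true, ih]
          split <;> simp_all [hu]
        · simp at hu
          simp [hu, ih]
      · simp [hxy]

-- ===== VERDICT (by name: the statement is the Claim_ definition above) =====
theorem check_capitalisation_spec : Claim_equal_check_capitalisation := by
  intro word1 word2 _
  unfold Spec_check_capitalisation check_capitalisation check_capitalisation_alt
  rw [pvLoopA_eq]
  simp
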